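-- pv_equiv track=rewrite | github.com/sani0928/sani_beakjoon | im추천/12927_배수스위치.py | switch_edison
-- ===== SOURCE A (Python) =====
-- def switch_edison(edison):
--     n = len(edison)
--     count = 0
--
--     for i in range(n):
--         if edison[i] == 'Y':
--             count += 1
--             for j in range(i,n,i+1):
--                 if edison[j] == 'Y':
--                     edison[j] = 'N'
--                 else:
--                     edison[j] = 'Y'
--     for k in edison:
--         if k == 'Y':
--             return -1
--     return count
-- ===== SOURCE B (Python) =====
-- # Divisor-parity DP instead of a multiples sieve: decides each press from counts of
-- # pressed proper divisors, then rewrites edison in place once at the end (same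
-- # observable mutation as A).  The -1 branch of A is dead, so B never returns -1.
-- def switch_edison(edison):
--     n = len(edison)
--     pressed = []
--     count = 0
--     final = []
--     for i in range(n):
--         t = sum(1 for j in range(i) if pressed[j] and (i + 1) % (j + 1) == 0)
--         p = (edison[i] == 'Y') != (t % 2 == 1)
--         pressed.append(p)
--         if p:
--             count += 1
--         T = t + (1 if p else 0)
--         if T == 0:
--             final.append(edison[i])
--         else:
--             final.append('Y' if (edison[i] == 'Y') == (T % 2 == 0) else 'N')
--     edison[:] = final
--     return count
-- ===== Notes on version B (the rewrite author's own statement) =====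
-- stated objective: alternative
-- what changed: Replaces A's in-place multiples sieve (each pressed switch toggles all its multiples forward) by a divisor-parity dynamic program: each position's pressed state is decided from the parity of its already-pressed proper divisors, and the list is rewritten once at the end; the dead -1 branch disappears.
import Mathlib
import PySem

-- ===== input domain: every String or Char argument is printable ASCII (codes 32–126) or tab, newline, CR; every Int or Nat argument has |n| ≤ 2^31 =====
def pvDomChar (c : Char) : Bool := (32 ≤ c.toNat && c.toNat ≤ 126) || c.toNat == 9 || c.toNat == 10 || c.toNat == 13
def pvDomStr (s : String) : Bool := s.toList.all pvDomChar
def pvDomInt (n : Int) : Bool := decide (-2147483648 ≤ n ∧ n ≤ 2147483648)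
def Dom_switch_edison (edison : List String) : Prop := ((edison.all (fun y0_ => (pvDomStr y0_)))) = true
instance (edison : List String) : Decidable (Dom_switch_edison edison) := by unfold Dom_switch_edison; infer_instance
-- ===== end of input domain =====

-- B replaces A's forward multiples sieve by a divisor-parity DP (proved to return the
-- same count); the equivalence proved here is about the RETURN value only — both
-- Pythons mutate `edison` in place identically, which the Lean ports do not model.

-- ===== PORT A =====
-- 'if edison[j]=='Y': edison[j]='N' else: edison[j]='Y''  (indices are always in range here,
-- so List.getD/List.set are exact for Python's edison[j] read/write)
def pvToggle (s : String) : String := if s = "Y" then "N" else "Y"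

-- one iteration of A's outer loop: state = (edison list, count)
def pvAStep (n : Nat) (st : List String × Int) (i : Nat) : List String × Int :=
  if st.1.getD i "" = "Y" then
    ((PySem.List.pyRange (i : Int) (n : Int) ((i : Int) + 1)).foldl
        (fun acc j => acc.set j.toNat (pvToggle (acc.getD j.toNat ""))) st.1,
     st.2 + 1)
  else st

def switch_edison (edison : List String) : Int :=
  let n := edison.length
  let st := (List.range n).foldl (pvAStep n) (edison, 0)
  -- 'for k in edison: if k == 'Y': return -1' then 'return count'
  if st.1.contains "Y" then -1 else st.2

-- ===== PORT B =====
-- one iteration of B's loop: state = (pressed, count, final); all ints involved are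
-- nonnegative, so Nat % is exact for Python's %
def pvAltStep (edison : List String) (st : List Bool × Int × List String) (i : Nat) :
    List Bool × Int × List String :=
  let t := (List.range i).countP (fun j => st.1.getD j false && ((i + 1) % (j + 1) == 0))
  let p := (decide (edison.getD i "" = "Y")) != (decide (t % 2 = 1))
  let T := t + (if p then 1 else 0)
  (st.1 ++ [p],
   st.2.1 + (if p then 1 else 0),
   st.2.2 ++ [if T = 0 then edison.getD i ""
              else if (decide (edison.getD i "" = "Y")) == (decide (T % 2 = 0)) then "Y" else "N"])

-- Source B's trailing 'edison[:] = final' is a side effect on the argument (mirrored from A)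
-- with no counterpart in the returned count
def switch_edison_alt (edison : List String) : Int :=
  ((List.range edison.length).foldl (pvAltStep edison) ([], 0, [])).2.1

-- ===== PRECONDITION & SPEC =====
def Spec_switch_edison (edison : List String) (out : Int) : Prop := out = switch_edison_alt edison
instance (edison : List String) (out : Int) : Decidable (Spec_switch_edison edison out) := by unfold Spec_switch_edison; infer_instance

-- ===== CLAIM (what is proved, stated in full; the proofs are below) =====
def Claim_equal_switch_edison : Prop := ∀ (edison : List String), Dom_switch_edison edison → Spec_switch_edison edison (switch_edison edison)

-- ===== LEMMAS AND PROOFS =====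

-- the original string after t toggles
def togN (s : String) (t : Nat) : String :=
  if t = 0 then s else if (s = "Y") ↔ (t % 2 = 0) then "Y" else "N"

-- number of pressed positions among pl that toggle position k
def tcnt (pl : List Bool) (k : Nat) : Nat :=
  (List.range pl.length).countP (fun j => pl.getD j false && ((k + 1) % (j + 1) == 0))

def Bst (e : List String) (i : Nat) : List Bool × Int × List String :=
  (List.range i).foldl (pvAltStep e) ([], 0, [])

def Ast (e : List String) (i : Nat) : List String × Int :=
  (List.range i).foldl (pvAStep e.length) (e, 0)

theorem togN_succ (s : String) (t : Nat) : togN s (t + 1) = pvToggle (togN s t) := by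
  rcases Nat.eq_zero_or_pos t with rfl | ht
  · by_cases hs : s = "Y" <;> simp [togN, pvToggle, hs]
  · have h1 : ¬ (t + 1 = 0) := by omega
    have h0 : ¬ (t = 0) := by omega
    rcases Nat.mod_two_eq_zero_or_one t with h2 | h2
    · have h3 : (t + 1) % 2 = 1 := by omega
      by_cases hs : s = "Y" <;> simp [togN, pvToggle, hs, h0, h1, h2, h3]
    · have h3 : (t + 1) % 2 = 0 := by omega
      by_cases hs : s = "Y" <;> simp [togN, pvToggle, hs, h0, h1, h2, h3]

theorem togN_eq_Y (s : String) (t : Nat) :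
    (togN s t = "Y") ↔ ((decide (s = "Y")) != (decide (t % 2 = 1))) = true := by
  rcases Nat.eq_zero_or_pos t with rfl | ht
  · by_cases hs : s = "Y" <;> simp [togN, hs]
  · have h0 : ¬ (t = 0) := by omega
    rcases Nat.mod_two_eq_zero_or_one t with h2 | h2 <;>
      have h3 : (t % 2 = 1) ↔ ¬ (t % 2 = 0) := by omega
    all_goals by_cases hs : s = "Y" <;> simp [togN, hs, h0, h2] <;> omega

theorem bst_succ (e : List String) (i : Nat) :
    Bst e (i + 1) = pvAltStep e (Bst e i) i := by
  simp [Bst, List.range_succ]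

theorem ast_succ (e : List String) (i : Nat) :
    Ast e (i + 1) = pvAStep e.length (Ast e i) i := by
  simp [Ast, List.range_succ]

-- the fold of disjoint toggle-updates, pointwise
theorem innerFold (ks : List Nat) (hp : ks.Pairwise (· < ·)) (xs : List String) :
    (ks.foldl (fun acc k => acc.set k (pvToggle (acc.getD k ""))) xs).length = xs.length ∧
    ∀ k : Nat, (ks.foldl (fun acc k => acc.set k (pvToggle (acc.getD k ""))) xs)[k]? =
      if k ∈ ks then xs[k]?.map pvToggle else xs[k]? := by
  induction ks generalizing xs with
  | nil => simp
  | cons j rest ih =>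
    have hj : ∀ r ∈ rest, j < r := fun r hr => (List.pairwise_cons.mp hp).1 r hr
    obtain ⟨ihl, ihg⟩ := ih (List.pairwise_cons.mp hp).2 (xs.set j (pvToggle (xs.getD j "")))
    constructor
    · simpa using ihl
    · intro k
      have hset : (xs.set j (pvToggle (xs.getD j "")))[k]? =
          if j = k then (if j < xs.length then some (pvToggle (xs.getD j "")) else none)
          else xs[k]? := List.getElem?_set
      by_cases hkr : k ∈ rest
      · have hjk : j ≠ k := Nat.ne_of_lt (hj k hkr)
        simp only [List.foldl_cons, ihg k, hkr, List.mem_cons]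
        rw [hset, if_neg hjk]
        simp [hkr]
      · by_cases hjk : j = k
        · subst hjk
          simp only [List.foldl_cons, ihg j, hkr, List.mem_cons]
          rw [hset, if_pos rfl]
          by_cases hl : j < xs.length
          · have : xs[j]? = some (xs.getD j "") := by
              rw [List.getD_eq_getElem?_getD, List.getElem?_eq_getElem hl]; rfl
            simp [hl, this]
          · have : xs[j]? = none := List.getElem?_eq_none (by omega)
            simp [hl, this]
        · simp only [List.foldl_cons, ihg k, hkr, List.mem_cons]
          rw [hset, if_neg hjk]
          have hne : ¬ (k = j ∨ False) := by
            intro hor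
            rcases hor with h | h
            · exact hjk h.symm
            · exact h
          rw [if_neg hne]
          simp

-- membership in A's inner loop range, over Nat
theorem mem_innerRange_toNat (i n k : Nat) :
    (k ∈ (PySem.List.pyRange (i : Int) (n : Int) ((i : Int) + 1)).map Int.toNat) ↔
      (k < n ∧ (k + 1) % (i + 1) = 0) := by
  have hpos : (0 : Int) < (i : Int) + 1 := by positivity
  have hmem : ∀ x : Int, x ∈ PySem.List.pyRange (i : Int) (n : Int) ((i : Int) + 1) ↔
      (i : Int) ≤ x ∧ x < n ∧ ((i : Int) + 1) ∣ x - i :=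
    PySem.List.mem_pyRange_iff_of_pos hpos
  constructor
  · intro hk
    obtain ⟨j, hj, rfl⟩ := List.mem_map.mp hk
    obtain ⟨h1, h2, h3⟩ := (hmem j).mp hj
    have hj0 : (0 : Int) ≤ j := le_trans (by positivity) h1
    have hjn : j = ((j.toNat : Nat) : Int) := (Int.toNat_of_nonneg hj0).symm
    have hdvd : ((i : Int) + 1) ∣ (j + 1) := by
      have := dvd_add h3 (dvd_refl ((i : Int) + 1))
      have heq : j - i + ((i : Int) + 1) = j + 1 := by ring
      rwa [heq] at this
    have hdvdN : (i + 1) ∣ (j.toNat + 1) := by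
      have : ((i + 1 : Nat) : Int) ∣ ((j.toNat + 1 : Nat) : Int) := by
        push_cast; rw [← hjn]; exact hdvd
      exact_mod_cast this
    exact ⟨by omega, Nat.mod_eq_zero_of_dvd hdvdN⟩
  · rintro ⟨hkn, hmod⟩
    have hdvdN : (i + 1) ∣ (k + 1) := Nat.dvd_of_mod_eq_zero hmod
    have hik : i ≤ k := by
      have := Nat.le_of_dvd (by omega) hdvdN; omega
    have hdvd : ((i : Int) + 1) ∣ ((k : Int) - i) := by
      have h1 : ((i + 1 : Nat) : Int) ∣ ((k + 1 : Nat) : Int) := by exact_mod_cast hdvdN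
      have h2 : ((i : Int) + 1) ∣ ((k : Int) + 1) := by push_cast at h1; exact_mod_cast h1
      have := dvd_sub h2 (dvd_refl ((i : Int) + 1))
      have heq : (k : Int) + 1 - ((i : Int) + 1) = (k : Int) - i := by ring
      rwa [heq] at this
    refine List.mem_map.mpr ⟨(k : Int), (hmem (k : Int)).mpr ⟨by exact_mod_cast hik, by exact_mod_cast hkn, hdvd⟩, Int.toNat_natCast k⟩

-- A's inner loop range is strictly increasing (as Nat indices)
theorem pairwise_innerRange (i n : Nat) :
    ((PySem.List.pyRange (i : Int) (n : Int) ((i : Int) + 1)).map Int.toNat).Pairwise (· < ·) := by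
  have hpos : (0 : Int) < (i : Int) + 1 := by positivity
  rw [PySem.List.pyRange_of_pos _ _ hpos, List.map_map]
  refine List.Pairwise.map _ (fun a b hab => ?_) List.pairwise_lt_range
  show (Int.toNat ((i : Int) + ((i : Int) + 1) * (a : Nat))) <
       (Int.toNat ((i : Int) + ((i : Int) + 1) * (b : Nat)))
  have ea : ((i : Int) + ((i : Int) + 1) * (a : Nat)) = ((i + (i + 1) * a : Nat) : Int) := by
    push_cast; ring
  have eb : ((i : Int) + ((i : Int) + 1) * (b : Nat)) = ((i + (i + 1) * b : Nat) : Int) := by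
    push_cast; ring
  rw [ea, eb, Int.toNat_natCast, Int.toNat_natCast]
  have : (i + 1) * a < (i + 1) * b := mul_lt_mul_of_pos_left hab (show 0 < i + 1 by omega)
  omega

theorem tcnt_append (pl : List Bool) (p : Bool) (k : Nat) :
    tcnt (pl ++ [p]) k =
      tcnt pl k + (if p && ((k + 1) % (pl.length + 1) == 0) then 1 else 0) := by
  unfold tcnt
  have hlen : (pl ++ [p]).length = pl.length + 1 := by simp
  rw [hlen, List.range_succ, List.countP_append]
  congr 1
  · refine List.countP_congr (fun j hj => ?_)
    have hjl : j < pl.length := List.mem_range.mp hj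
    have : (pl ++ [p]).getD j false = pl.getD j false := by
      rw [List.getD_eq_getElem?_getD, List.getD_eq_getElem?_getD,
        List.getElem?_append_left hjl]
    rw [this]
  · have : (pl ++ [p]).getD pl.length false = p := by
      rw [List.getD_eq_getElem?_getD, List.getElem?_concat_length]; rfl
    simp [this, List.countP_cons]

theorem tcnt_stable (pl ext : List Bool) (k : Nat) (hk : k < pl.length) :
    tcnt (pl ++ ext) k = tcnt pl k := by
  unfold tcnt
  have hlen : (pl ++ ext).length = pl.length + ext.length := by simp
  rw [hlen, List.range_add, List.countP_append]
  have h2 : List.countP (fun j => (pl ++ ext).getD j false && ((k + 1) % (j + 1) == 0))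
      ((List.range ext.length).map (fun x => pl.length + x)) = 0 := by
    refine List.countP_eq_zero.mpr (fun j hj => ?_)
    obtain ⟨c, _, rfl⟩ := List.mem_map.mp hj
    have hmod : (k + 1) % (pl.length + c + 1) = k + 1 := Nat.mod_eq_of_lt (by omega)
    simp [hmod]
  rw [h2, Nat.add_zero]
  refine List.countP_congr (fun j hj => ?_)
  have hjl : j < pl.length := List.mem_range.mp hj
  have : (pl ++ ext).getD j false = pl.getD j false := by
    rw [List.getD_eq_getElem?_getD, List.getD_eq_getElem?_getD,
      List.getElem?_append_left hjl]
  rw [this]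

theorem bst_step_fst (e : List String) (st : List Bool × Int × List String) (i : Nat) :
    ∃ p, (pvAltStep e st i).1 = st.1 ++ [p] := ⟨_, rfl⟩

theorem bst_prefix (e : List String) (i i' : Nat) (h : i ≤ i') :
    ∃ ext, (Bst e i').1 = (Bst e i).1 ++ ext := by
  obtain ⟨j, rfl⟩ := Nat.le.dest h
  induction j with
  | zero => exact ⟨[], by simp⟩
  | succ m ih =>
    obtain ⟨ext, hext⟩ := ih (by omega)
    have : i + (m + 1) = (i + m) + 1 := by omega
    rw [this, bst_succ]
    obtain ⟨p, hp⟩ := bst_step_fst e (Bst e (i + m)) (i + m)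
    exact ⟨ext ++ [p], by rw [hp, hext, List.append_assoc]⟩
theorem foldA_eq (js : List Int) (xs : List String) :
    js.foldl (fun acc j => acc.set j.toNat (pvToggle (acc.getD j.toNat ""))) xs
      = (js.map Int.toNat).foldl (fun acc k => acc.set k (pvToggle (acc.getD k ""))) xs := by
  rw [List.foldl_map]

-- the main joint invariant of the two folds
theorem mainInv (e : List String) (i : Nat) (hi : i ≤ e.length) :
    (Bst e i).1.length = i ∧ (Ast e i).2 = (Bst e i).2.1 ∧
    (Ast e i).1.length = e.length ∧
    ∀ k, k < e.length → (Ast e i).1[k]? = some (togN (e.getD k "") (tcnt (Bst e i).1 k)) := by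
  induction i with
  | zero =>
    refine ⟨rfl, rfl, rfl, fun k hk => ?_⟩
    have h0 : (Ast e 0).1[k]? = e[k]? := rfl
    have hb : tcnt (Bst e 0).1 k = 0 := by simp [Bst, tcnt]
    rw [h0, hb, List.getElem?_eq_getElem hk]
    simp [togN, List.getD_eq_getElem?_getD, List.getElem?_eq_getElem hk]
  | succ i ih =>
    obtain ⟨hL, hC, hAL, hAk⟩ := ih (by omega)
    have hgetD : (Ast e i).1.getD i "" = togN (e.getD i "") (tcnt (Bst e i).1 i) := by
      rw [List.getD_eq_getElem?_getD, hAk i (by omega)]; rfl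
    have hcount : (List.range i).countP
        (fun j => (Bst e i).1.getD j false && ((i + 1) % (j + 1) == 0)) = tcnt (Bst e i).1 i := by
      rw [tcnt, hL]
    rw [bst_succ, ast_succ]
    simp only [pvAltStep, pvAStep, hcount, hgetD]
    by_cases hY : togN (e.getD i "") (tcnt (Bst e i).1 i) = "Y"
    · have hp : (decide (e.getD i "" = "Y") != decide (tcnt (Bst e i).1 i % 2 = 1)) = true :=
        (togN_eq_Y _ _).mp hY
      rw [if_pos hY, hp]
      obtain ⟨hfl, hfg⟩ := innerFold
        ((PySem.List.pyRange (i : Int) (e.length : Int) ((i : Int) + 1)).map Int.toNat)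
        (pairwise_innerRange i e.length) (Ast e i).1
      refine ⟨by simp [hL], by rw [hC]; simp, ?_, fun k hk => ?_⟩
      · rw [foldA_eq]; rw [hfl, hAL]
      · rw [foldA_eq, hfg k, hAk k hk,
          tcnt_append (Bst e i).1 _ k, hL]
        by_cases hk2 : (k + 1) % (i + 1) = 0
        · rw [if_pos ((mem_innerRange_toNat i e.length k).mpr ⟨hk, hk2⟩)]
          have hbeq : (true && ((k + 1) % (i + 1) == 0)) = true := by simp [hk2]
          rw [hbeq, if_pos rfl, Option.map_some, togN_succ]
        · rw [if_neg (fun hmem => hk2 ((mem_innerRange_toNat i e.length k).mp hmem).2)]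
          have hbeq : (true && ((k + 1) % (i + 1) == 0)) = false := by simp [hk2]
          rw [hbeq]
          simp
    · have hp : (decide (e.getD i "" = "Y") != decide (tcnt (Bst e i).1 i % 2 = 1)) = false := by
        rw [← Bool.not_eq_true]
        exact fun h => hY ((togN_eq_Y _ _).mpr h)
      rw [if_neg hY, hp]
      refine ⟨by simp [hL], by rw [hC]; simp, hAL, fun k hk => ?_⟩
      rw [hAk k hk, tcnt_append (Bst e i).1 _ k, hL]
      simp

theorem noY (e : List String) (k : Nat) (hk : k < e.length) :
    togN (e.getD k "") (tcnt (Bst e e.length).1 k) ≠ "Y" := by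
  obtain ⟨hL, _, _, _⟩ := mainInv e k (by omega)
  have hcount : (List.range k).countP
      (fun j => (Bst e k).1.getD j false && ((k + 1) % (j + 1) == 0)) = tcnt (Bst e k).1 k := by
    rw [tcnt, hL]
  have hsucc : (Bst e (k + 1)).1 = (Bst e k).1 ++
      [decide (e.getD k "" = "Y") != decide (tcnt (Bst e k).1 k % 2 = 1)] := by
    rw [bst_succ]; simp only [pvAltStep, hcount]
  obtain ⟨ext, hext⟩ := bst_prefix e (k + 1) e.length (by omega)
  have hlen1 : k < (Bst e (k + 1)).1.length := by rw [hsucc]; simp [hL]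
  have hstable : tcnt (Bst e e.length).1 k = tcnt (Bst e (k + 1)).1 k := by
    rw [hext, tcnt_stable _ _ _ hlen1]
  rw [hstable, hsucc, tcnt_append, hL]
  have hself : ((k + 1) % (k + 1) == 0) = true := by simp
  rw [hself]
  by_cases hp : (decide (e.getD k "" = "Y") != decide (tcnt (Bst e k).1 k % 2 = 1)) = true
  · rw [hp]
    norm_num
    rw [togN_succ, ← List.getD_eq_getElem?_getD, (togN_eq_Y _ _).mpr hp]
    simp [pvToggle]
  · have hp' : (decide (e.getD k "" = "Y") != decide (tcnt (Bst e k).1 k % 2 = 1)) = false := by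
      rw [← Bool.not_eq_true]; exact hp
    rw [hp']
    norm_num
    exact fun h => hp ((togN_eq_Y _ _).mp h)

-- ===== VERDICT (by name: the statement is the Claim_ definition above) =====
theorem switch_edison_spec : Claim_equal_switch_edison := by
  intro e _
  unfold Spec_switch_edison switch_edison switch_edison_alt
  obtain ⟨_, hC, hAL, hAk⟩ := mainInv e e.length (le_refl _)
  have hnoY : ((List.range e.length).foldl (pvAStep e.length) (e, 0)).1.contains "Y" = false := by
    rw [← Bool.not_eq_true, List.contains_iff_mem]
    intro hmem
    obtain ⟨m, hm, hget⟩ := List.mem_iff_getElem.mp hmem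
    have hm' : m < e.length := by
      have : (Ast e e.length).1.length = e.length := hAL
      rw [Ast] at this; omega
    have := hAk m hm'
    rw [Ast] at this
    rw [List.getElem?_eq_getElem hm] at this
    have hYv : togN (e.getD m "") (tcnt (Bst e e.length).1 m) = "Y" := by
      rw [← Option.some_inj, ← this, hget]
    exact noY e m hm' hYv
  simp only [hnoY, Bool.false_eq_true, if_false]
  have := hC
  rw [Ast, Bst] at this
  exact this
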